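-- pv_equiv track=rewrite | github.com/rishabhjain02/Data-Structures-And-Algorithms | String Algorithm/Count A.py | solve
-- ===== SOURCE A (Python) =====
-- def solve(A):
--     n = len(A)
--     count = 0
--     for c in A:
--         if c == "a":
--             count += 1
--     ans = count*(count+1)//2
--     return ans
-- ===== SOURCE B (Python) =====
-- def solve(A):
--     ans = 0
--     c = 0
--     for ch in A:
--         if ch == "a":
--             c += 1
--             ans += c
--     return ans
-- ===== Notes on version B (the rewrite author's own statement) =====
-- stated objective: alternative
-- what changed: B fuses counting and summing into one pass, accumulating ans += running count at each 'a', instead of counting first and applying the closed form count*(count+1)//2.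
import Mathlib
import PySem

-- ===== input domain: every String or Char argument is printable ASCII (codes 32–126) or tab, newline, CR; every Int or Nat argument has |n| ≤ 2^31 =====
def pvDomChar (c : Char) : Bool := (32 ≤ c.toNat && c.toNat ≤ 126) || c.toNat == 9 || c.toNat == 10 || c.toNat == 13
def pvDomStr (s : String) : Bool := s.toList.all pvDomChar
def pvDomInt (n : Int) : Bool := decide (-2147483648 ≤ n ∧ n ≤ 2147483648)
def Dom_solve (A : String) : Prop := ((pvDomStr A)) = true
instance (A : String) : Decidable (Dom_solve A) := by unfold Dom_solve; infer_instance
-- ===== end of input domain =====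

-- B fuses counting and summing into one pass (ans += running count at each 'a') instead of
-- counting first and applying the closed form count*(count+1)//2; alternative decomposition, same cost.

-- ===== PORT A =====
-- count 'a's with a loop, then ans = count*(count+1)//2
def solve (A : String) : Int :=
  let count : Int := A.toList.foldl (fun count c => if c = 'a' then count + 1 else count) 0
  PySem.Int.floordiv (count * (count + 1)) 2

-- ===== PORT B =====
-- single pass carrying (c, ans); at each 'a': c += 1 then ans += c
def solve_alt (A : String) : Int :=
  (A.toList.foldl (fun (st : Int × Int) ch =>
      if ch = 'a' then (st.1 + 1, st.2 + (st.1 + 1)) else st) (0, 0)).2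

-- ===== PRECONDITION & SPEC =====
def Spec_solve (A : String) (out : Int) : Prop := out = solve_alt A
instance (A : String) (out : Int) : Decidable (Spec_solve A out) := by unfold Spec_solve; infer_instance

-- ===== CLAIM (what is proved, stated in full; the proofs are below) =====
def Claim_equal_solve : Prop := ∀ (A : String), Dom_solve A → Spec_solve A (solve A)

-- ===== LEMMAS AND PROOFS =====

-- generalized loop invariant: B's fold from (c, ans) with c ≥ 0 lands at (c', ans')
-- where c' is A's count continued from c and ans' = ans + T(c') - T(c), T n = n(n+1)/2.
theorem pv_fold_inv (l : List Char) (c ans : Int) :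
    (l.foldl (fun (st : Int × Int) ch =>
        if ch = 'a' then (st.1 + 1, st.2 + (st.1 + 1)) else st) (c, ans)) =
    (l.foldl (fun count ch => if ch = 'a' then count + 1 else count) c,
     ans + ((l.foldl (fun count ch => if ch = 'a' then count + 1 else count) c) *
            ((l.foldl (fun count ch => if ch = 'a' then count + 1 else count) c) + 1)
          - c * (c + 1)) / 2) := by
  induction l generalizing c ans with
  | nil => simp
  | cons h t ih =>
    by_cases hc : h = 'a' <;> simp [hc, ih]
    have key : ∀ k : Int, (k * (k+1) - (c+1)*(c+1+1)) / 2 = (k*(k+1) - c*(c+1))/2 - (c+1) := by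
      intro k
      have h2 : k * (k+1) - c*(c+1) = (k*(k+1) - (c+1)*(c+1+1)) + 2*(c+1) := by ring
      omega
    rw [key]; ring

theorem pv_count_nonneg (l : List Char) (c : Int) (hc : 0 ≤ c) :
    0 ≤ l.foldl (fun count ch => if ch = 'a' then count + 1 else count) c := by
  induction l generalizing c with
  | nil => simpa
  | cons h t ih => by_cases hch : h = 'a' <;> simp [hch] <;> [exact ih _ (by omega); exact ih _ hc]

-- ===== VERDICT (by name: the statement is the Claim_ definition above) =====
theorem solve_spec : Claim_equal_solve := by
  intro A _
  unfold Spec_solve solve solve_alt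
  rw [pv_fold_inv]
  set k := A.toList.foldl (fun count ch => if ch = 'a' then count + 1 else count) (0 : Int) with hk
  have hk0 : 0 ≤ k := pv_count_nonneg _ 0 le_rfl
  have : PySem.Int.floordiv (k * (k + 1)) 2 = (k * (k + 1)) / 2 := by
    rw [PySem.Int.floordiv_eq_ediv_of_pos (by omega)]
  rw [this]; simp
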